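-- pv_equiv track=rewrite | github.com/codebyzeb/g2p-plus | bnc_processor.py | convert_to_ipa
-- ===== SOURCE A (Python) =====
-- CONVERSION_TABLE = {
--     'P' : 'p',
--     'B' : 'b',
--     'T' : 't',
--     'D' : 'd',
--     'CH' : 't̠ʃ',
--     'JH' : 'd̠ʒ',
--     'K' : 'k',
--     'G' : 'g',
--     'M' : 'm',
--     'N' : 'n',
--     'NG' : 'ŋ',
--     'F' : 'f',
--     'V' : 'v',
--     'TH' : 'θ',
--     'DH' : 'ð',
--     'S' : 's',
--     'SH' : 'ʃ',
--     'ZH' : 'ʒ',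
--     'HH' : 'h',
--     'R' : 'r',
--     'L' : 'l',
--     'W' : 'w',
--     'Y' : 'j',
--     'Z' : 'z',
--     'IH' : 'ɪ',
--     'EH' : 'ɛ',
--     'AE' : 'a',
--     'AH0' : 'ə',
--     'AH1' : 'ʌ',
--     'AH2' : 'ʌ',
--     'UH1' : 'ʊ',
--     'UH2' : 'ʊ',
--     'OH': 'ɒ',
--     'UH' : 'ʊ',
--     'IY' : 'i:',
--     'EY' : 'eɪ',
--     'AY' : 'aɪ',
--     'OY' : 'oɪ',
--     'AW' : 'aʊ',
--     'OW' : 'əʊ',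
--     'UW' : 'u:',
--     'ER0': 'ɚ',
--     'ER1': 'ə:',
--     'ER2': 'ə',
--     'AA' : 'ɑ:',
--     'AO' : 'ɔ:'
-- }
--
-- def convert_to_ipa(phones):
--     """Converts a list of phones to IPA."""
--     ipa = []
--     i = 0
--     while i < len(phones):
--         # Deal with dipthongs
--         phone = phones[i].upper()
--         if i != len(phones) - 1 and (phone == 'IH1' or phone == 'IH2') and phones[i+1] == 'AH0':
--             ipa.append('ɪə')
--             i += 1
--         elif phone in CONVERSION_TABLE:
--             ipa.append(CONVERSION_TABLE[phone])
--         elif phone[-1] in ['0','1','2'] and phone[:-1] in CONVERSION_TABLE: # Stressed vowel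
--             ipa.append(CONVERSION_TABLE[phone[:-1]])
--         else:
--             raise ValueError('Unknown phone: {}'.format(phone))
--         i += 1
--     return ipa
-- ===== SOURCE B (Python) =====
-- CONVERSION_TABLE = {
--     'P' : 'p', 'B' : 'b', 'T' : 't', 'D' : 'd', 'CH' : 't\u0320\u0283',
--     'JH' : 'd\u0320\u0292', 'K' : 'k', 'G' : 'g', 'M' : 'm', 'N' : 'n',
--     'NG' : '\u014b', 'F' : 'f', 'V' : 'v', 'TH' : '\u03b8', 'DH' : '\u00f0',
--     'S' : 's', 'SH' : '\u0283', 'ZH' : '\u0292', 'HH' : 'h', 'R' : 'r',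
--     'L' : 'l', 'W' : 'w', 'Y' : 'j', 'Z' : 'z', 'IH' : '\u026a',
--     'EH' : '\u025b', 'AE' : 'a', 'AH0' : '\u0259', 'AH1' : '\u028c',
--     'AH2' : '\u028c', 'UH1' : '\u028a', 'UH2' : '\u028a', 'OH': '\u0252',
--     'UH' : '\u028a', 'IY' : 'i:', 'EY' : 'e\u026a', 'AY' : 'a\u026a',
--     'OY' : 'o\u026a', 'AW' : 'a\u028a', 'OW' : '\u0259\u028a', 'UW' : 'u:',
--     'ER0': '\u025a', 'ER1': '\u0259:', 'ER2': '\u0259', 'AA' : '\u0251:',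
--     'AO' : '\u0254:'
-- }
--
-- def _chunks(phones):
--     """First pass: group the phone list into chunks, pairing an IH1/IH2
--     followed by a literal 'AH0' into one 2-tuple chunk."""
--     chunks = []
--     i = 0
--     while i < len(phones):
--         if (i + 1 < len(phones) and phones[i].upper() in ('IH1', 'IH2')
--                 and phones[i + 1] == 'AH0'):
--             chunks.append((phones[i], phones[i + 1]))
--             i += 2
--         else:
--             chunks.append((phones[i],))
--             i += 1
--     return chunks
--
-- def _ipa(chunk):
--     """Second pass: convert one chunk to its IPA string."""
--     if len(chunk) == 2:
--         return '\u026a\u0259'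
--     p = chunk[0].upper()
--     if p in CONVERSION_TABLE:
--         return CONVERSION_TABLE[p]
--     if p and p[-1] in '012' and p[:-1] in CONVERSION_TABLE:
--         return CONVERSION_TABLE[p[:-1]]
--     raise ValueError('Unknown phone: {}'.format(p))
--
-- def convert_to_ipa(phones):
--     """Converts a list of phones to IPA."""
--     return [_ipa(c) for c in _chunks(phones)]
-- ===== Notes on version B (the rewrite author's own statement) =====
-- stated objective: alternative
-- what changed: A's single index-driven while loop that conditionally advances by 2 is replaced by a two-pass pipeline: a first pass groups the phone list into chunks (pairing IH1/IH2 followed by a literal 'AH0'), a second pass maps each chunk to its IPA string.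
import Mathlib
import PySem

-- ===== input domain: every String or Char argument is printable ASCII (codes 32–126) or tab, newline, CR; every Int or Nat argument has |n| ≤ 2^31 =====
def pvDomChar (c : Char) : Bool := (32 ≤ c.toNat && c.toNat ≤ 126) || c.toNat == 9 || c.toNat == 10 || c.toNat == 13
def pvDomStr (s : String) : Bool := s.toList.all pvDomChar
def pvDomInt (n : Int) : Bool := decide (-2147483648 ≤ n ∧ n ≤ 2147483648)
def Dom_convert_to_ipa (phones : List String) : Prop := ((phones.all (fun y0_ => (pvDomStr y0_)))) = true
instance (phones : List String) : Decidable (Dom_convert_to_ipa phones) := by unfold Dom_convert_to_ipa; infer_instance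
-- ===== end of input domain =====

-- B replaces A's single index-driven while loop (conditional double advance) by a two-pass
-- pipeline: chunk the phones (pairing IH1/IH2 + literal 'AH0'), then map chunks to IPA.


-- CONVERSION_TABLE (module constant shared by both programs)
def pvTable : PySem.Dict String String := PySem.Dict.mk [
  ("P", "p"), ("B", "b"), ("T", "t"), ("D", "d"), ("CH", "t̠ʃ"), ("JH", "d̠ʒ"),
  ("K", "k"), ("G", "g"), ("M", "m"), ("N", "n"), ("NG", "ŋ"), ("F", "f"),
  ("V", "v"), ("TH", "θ"), ("DH", "ð"), ("S", "s"), ("SH", "ʃ"), ("ZH", "ʒ"),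
  ("HH", "h"), ("R", "r"), ("L", "l"), ("W", "w"), ("Y", "j"), ("Z", "z"),
  ("IH", "ɪ"), ("EH", "ɛ"), ("AE", "a"), ("AH0", "ə"), ("AH1", "ʌ"), ("AH2", "ʌ"),
  ("UH1", "ʊ"), ("UH2", "ʊ"), ("OH", "ɒ"), ("UH", "ʊ"), ("IY", "i:"), ("EY", "eɪ"),
  ("AY", "aɪ"), ("OY", "oɪ"), ("AW", "aʊ"), ("OW", "əʊ"), ("UW", "u:"),
  ("ER0", "ɚ"), ("ER1", "ə:"), ("ER2", "ə"), ("AA", "ɑ:"), ("AO", "ɔ:")]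

-- ===== PORT A =====
-- A's elif chain for a single (non-diphthong) phone; where Python raises
-- (ValueError/IndexError) the port returns [], discarding the tail — those inputs are outside Pre_.
def pvConvA (phone : String) (tl : List String) : List String :=
  match pvTable.get? phone with
  | some v => v :: tl
  | none =>
    match PySem.Str.pyGet? phone (-1) with          -- phone[-1]; none = IndexError
    | some c =>
      if c == '0' || c == '1' || c == '2' then      -- phone[-1] in ['0','1','2']
        match pvTable.get? (PySem.Str.slice phone none (some (-1))) with  -- phone[:-1]
        | some v => v :: tl
        | none => []                                -- raise ValueError
      else []                                       -- raise ValueError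
    | none => []                                    -- IndexError on phone == ''

-- A's while loop over i, advancing by 2 on the diphthong branch, as recursion on the list.
def pvGoA : List String → List String
  | [] => []
  | [p] => pvConvA (PySem.Str.upper p) []
  | p :: q :: rest =>
    let phone := PySem.Str.upper p
    if (phone == "IH1" || phone == "IH2") && q == "AH0" then
      "ɪə" :: pvGoA rest
    else
      pvConvA phone (pvGoA (q :: rest))

def convert_to_ipa (phones : List String) : List String := pvGoA phones

-- ===== PORT B =====
-- First pass: chunk the phones; a chunk is one phone (inl) or a diphthong pair (inr).
def pvChunks : List String → List (String ⊕ String × String)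
  | [] => []
  | [p] => [Sum.inl p]
  | p :: q :: rest =>
    if (PySem.Str.upper p == "IH1" || PySem.Str.upper p == "IH2") && q == "AH0" then
      Sum.inr (p, q) :: pvChunks rest
    else
      Sum.inl p :: pvChunks (q :: rest)

-- Second pass: one chunk to IPA; none = raise ValueError (unreachable under Pre_).
def pvIpa : String ⊕ String × String → Option String
  | Sum.inr _ => some "ɪə"
  | Sum.inl p =>
    let up := PySem.Str.upper p
    match pvTable.get? up with
    | some v => some v
    | none =>
      match PySem.Str.pyGet? up (-1) with           -- 'p and p[-1] ...': some exactly when p nonempty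
      | some c =>
        if c == '0' || c == '1' || c == '2' then    -- p[-1] in '012'
          pvTable.get? (PySem.Str.slice up none (some (-1)))   -- p[:-1]
        else none
      | none => none

def convert_to_ipa_alt (phones : List String) : List String :=
  (pvChunks phones).map (fun c => (pvIpa c).getD "")

-- ===== PRECONDITION & SPEC =====
-- A phone Python A can convert: its uppercase is in the table, or drops a stress digit 0/1/2
-- into a table key. A raises (ValueError, or IndexError on '') exactly when some phone fails this.
def pvConvOk (p : String) : Bool :=
  let up := PySem.Str.upper p
  (pvTable.get? up).isSome ||
  (match PySem.Str.pyGet? up (-1) with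
   | some c => (c == '0' || c == '1' || c == '2') &&
       (pvTable.get? (PySem.Str.slice up none (some (-1)))).isSome
   | none => false)

-- Pre_ excludes exactly the inputs on which Python A raises (ValueError on an unknown phone,
-- IndexError on the empty string); B raises there too.
def Pre_convert_to_ipa (phones : List String) : Prop := ∀ p ∈ phones, pvConvOk p = true
instance (phones : List String) : Decidable (Pre_convert_to_ipa phones) := by
  unfold Pre_convert_to_ipa; infer_instance

def pvWitness_convert_to_ipa : List String := ["hh", "IH1", "AH0", "l", "OW1"]

def Spec_convert_to_ipa (phones : List String) (out : List String) : Prop :=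
  out = convert_to_ipa_alt phones
instance (phones : List String) (out : List String) : Decidable (Spec_convert_to_ipa phones out) := by
  unfold Spec_convert_to_ipa; infer_instance

-- ===== CLAIM (what is proved, stated in full; the proofs are below) =====
def Claim_equal_convert_to_ipa : Prop := ∀ (phones : List String),
  Dom_convert_to_ipa phones → Pre_convert_to_ipa phones →
  Spec_convert_to_ipa phones (convert_to_ipa phones)

-- ===== LEMMAS AND PROOFS =====

-- On a convertible phone, A's elif chain produces exactly B's chunk conversion, cons'd on the tail.
theorem pvConvA_eq (p : String) (tl : List String) (h : pvConvOk p = true) :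
    pvConvA (PySem.Str.upper p) tl = ((pvIpa (Sum.inl p)).getD "") :: tl := by
  unfold pvConvOk at h
  unfold pvConvA pvIpa
  simp only [pysem] at h ⊢
  cases hg : pvTable.get? (PySem.Str.upper p) with
  | some v => simp
  | none =>
    simp only [hg, Option.isSome_none, Bool.false_or] at h ⊢
    cases hc : (PySem.Chars.upper p.toList).getLast? with
    | none => simp [hc] at h
    | some c =>
      simp only [hc] at h ⊢
      rcases Bool.and_eq_true_iff.mp h with ⟨hdig, hsome⟩
      cases hs : pvTable.get? (PySem.Str.slice (PySem.Str.upper p) none (some (-1))) with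
      | none => rw [hs] at hsome; simp at hsome
      | some v => simp [hdig]

set_option maxRecDepth 4096 in
theorem pvGoA_eq_alt (phones : List String) (h : ∀ p ∈ phones, pvConvOk p = true) :
    pvGoA phones = (pvChunks phones).map (fun c => (pvIpa c).getD "") := by
  induction phones using pvChunks.induct with
  | case1 => simp [pvGoA, pvChunks]
  | case2 p =>
    rw [pvGoA, pvChunks, List.map_cons, List.map_nil]
    exact pvConvA_eq p [] (h p (by simp))
  | case3 p q rest hcond ih =>
    rw [pvGoA, pvChunks]
    rw [if_pos hcond, if_pos hcond]
    rw [List.map_cons]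
    rw [ih (fun x hx => h x (by simp [hx]))]
    rfl
  | case4 p q rest hcond ih =>
    rw [pvGoA, pvChunks]
    rw [if_neg hcond, if_neg hcond, List.map_cons]
    rw [ih (fun x hx => h x (by simp at hx ⊢; tauto))]
    exact pvConvA_eq p _ (h p (by simp))

-- ===== VERDICT (by name: the statement is the Claim_ definition above) =====
theorem convert_to_ipa_spec : Claim_equal_convert_to_ipa := by
  intro phones _ hpre
  unfold Spec_convert_to_ipa convert_to_ipa convert_to_ipa_alt
  exact pvGoA_eq_alt phones hpre
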